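-- pv_equiv track=rewrite | github.com/branislavjenco/advent2019 | utils.py | get_param_mode
-- ===== SOURCE A (Python) =====
-- def get_param_mode(index, ins):
--     ins = ins // 100  # remove the opcode
--     mode = ins % 10
--     ins = ins // 10
--     for i in range(index - 1):
--         mode = ins % 10
--         ins = ins // 10
--     return mode
-- ===== SOURCE B (Python) =====
-- def get_param_mode(index, ins):
--     return ins // 100 // 10 ** max(0, index - 1) % 10
-- ===== Notes on version B (the rewrite author's own statement) =====
-- stated objective: simpler
-- what changed: Replaced the repeated //10 loop by one closed-form power-of-ten division: (ins // 100) // 10**max(0, index-1) % 10.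
import Mathlib
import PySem

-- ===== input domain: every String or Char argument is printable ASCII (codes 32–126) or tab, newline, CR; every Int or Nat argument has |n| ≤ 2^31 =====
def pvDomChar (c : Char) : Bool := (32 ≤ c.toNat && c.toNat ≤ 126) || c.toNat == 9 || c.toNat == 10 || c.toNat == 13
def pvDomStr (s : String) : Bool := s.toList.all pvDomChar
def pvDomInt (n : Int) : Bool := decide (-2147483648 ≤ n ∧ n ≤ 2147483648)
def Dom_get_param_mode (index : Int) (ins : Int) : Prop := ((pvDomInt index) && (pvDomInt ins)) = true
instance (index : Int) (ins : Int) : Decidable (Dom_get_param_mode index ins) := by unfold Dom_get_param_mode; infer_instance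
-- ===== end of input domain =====

-- B replaces A's repeated //10 loop by a single closed-form power-of-ten division (simpler).


-- ===== PORT A =====
-- literal port: strip the opcode, then peel one digit per loop iteration
def get_param_mode (index : Int) (ins : Int) : Int :=
  let ins1 := PySem.Int.floordiv ins 100
  let mode := PySem.Int.mod ins1 10
  let ins2 := PySem.Int.floordiv ins1 10
  let st := (PySem.List.pyRange 0 (index - 1) 1).foldl
    (fun (st : Int × Int) _ => (PySem.Int.mod st.2 10, PySem.Int.floordiv st.2 10))
    (mode, ins2)
  st.1

-- ===== PORT B =====
-- closed form: one division by 10^max(0, index-1)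
def get_param_mode_alt (index : Int) (ins : Int) : Int :=
  PySem.Int.mod
    (PySem.Int.floordiv (PySem.Int.floordiv ins 100) (10 ^ (max 0 (index - 1)).toNat)) 10

-- ===== PRECONDITION & SPEC =====
def Spec_get_param_mode (index : Int) (ins : Int) (out : Int) : Prop := out = get_param_mode_alt index ins
instance (index : Int) (ins : Int) (out : Int) : Decidable (Spec_get_param_mode index ins out) := by unfold Spec_get_param_mode; infer_instance

-- ===== CLAIM (what is proved, stated in full; the proofs are below) =====
def Claim_equal_get_param_mode : Prop := ∀ (index : Int) (ins : Int), Dom_get_param_mode index ins → Spec_get_param_mode index ins (get_param_mode index ins)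

-- ===== LEMMAS AND PROOFS =====

-- the loop's state after running over any list l, in terms of l.length
lemma pv_loop_eq (l : List Int) (m y : Int) :
    l.foldl (fun (st : Int × Int) _ => (PySem.Int.mod st.2 10, PySem.Int.floordiv st.2 10)) (m, y)
      = (if l.length = 0 then m else (y / 10 ^ (l.length - 1)) % 10, y / 10 ^ l.length) := by
  induction l generalizing m y with
  | nil => simp
  | cons a l ih =>
    rw [List.foldl_cons, ih]
    simp only [PySem.Int.mod_eq_emod_of_pos (by norm_num : (0:Int) < 10),
      PySem.Int.floordiv_eq_ediv_of_pos (by norm_num : (0:Int) < 10)]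
    cases l with
    | nil => simp
    | cons b l =>
      simp only [List.length_cons, Nat.add_sub_cancel, if_neg (Nat.succ_ne_zero _)]
      rw [Int.ediv_ediv_of_nonneg (by positivity), Int.ediv_ediv_of_nonneg (by norm_num), pow_succ',
        show (10:Int) * (10 * 10 ^ l.length) = 10 ^ (l.length + 1 + 1) by ring]

-- ===== VERDICT (by name: the statement is the Claim_ definition above) =====
theorem get_param_mode_spec : Claim_equal_get_param_mode := by
  intro index ins _
  unfold Spec_get_param_mode get_param_mode get_param_mode_alt
  simp only [pv_loop_eq]
  simp only [PySem.Int.mod_eq_emod_of_pos (by norm_num : (0:Int) < 10),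
    PySem.Int.floordiv_eq_ediv_of_pos (by norm_num : (0:Int) < 10),
    PySem.Int.floordiv_eq_ediv_of_pos (by positivity : (0:Int) < 10 ^ (max 0 (index - 1)).toNat),
    PySem.List.length_pyRange_one]
  by_cases h : index - 1 ≤ 0
  · rw [if_pos (by omega), (by omega : (max 0 (index - 1)).toNat = 0)]
    simp
  · rw [if_neg (by omega)]
    have hmax : (max 0 (index - 1)).toNat = (index - 1 - 0).toNat := by omega
    rw [hmax]
    have hk : ∃ k : Nat, (index - 1 - 0).toNat = k + 1 := ⟨(index - 1 - 0).toNat - 1, by omega⟩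
    obtain ⟨k, hk⟩ := hk
    rw [hk]
    simp only [Nat.add_sub_cancel]
    rw [Int.ediv_ediv_of_nonneg (by norm_num), pow_succ']

-- ===== VERDICT (by name: the statement is the Claim_ definition above) =====
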